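-- pv_equiv track=rewrite | github.com/FreshOceans/gc-agent-regression-tester | src/analytics_journey_runner.py | _resolve_category_from_policy_hints
-- ===== SOURCE A (Python) =====
-- from typing import Any, Optional
--
-- def _resolve_category_from_policy_hints(
--
--     raw_rows: list[dict[str, Any]],
--     policy_map: dict[str, dict[str, Any]],
-- ) -> Optional[str]:
--     candidate_tokens: list[str] = []
--     for row in raw_rows:
--         for value in (
--             row.get("intent"),
--             row.get("askAction"),
--             row.get("path"),
--         ):
--             token = _normalize_category_token(value)
--             if token:
--                 candidate_tokens.append(token)
--     policy_keys = [
--         key for key in policy_map.keys()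
--         if key and key != "default"
--     ]
--     if not policy_keys:
--         return None
--
--     for token in candidate_tokens:
--         if token in policy_map:
--             return token
--
--     for token in candidate_tokens:
--         for key in policy_keys:
--             if token == key:
--                 return key
--             if token in key or key in token:
--                 return key
--
--     return None
--
-- def _normalize_category_token(value: Any) -> str:
--     text = str(value or "").strip().lower()
--     if not text:
--         return ""
--     normalized = text.replace("-", "_").replace(" ", "_")
--     while "__" in normalized:
--         normalized = normalized.replace("__", "_")
--     return normalized.strip("_")
-- ===== SOURCE B (Python) =====
-- from typing import Any, Optional
--
-- def _resolve_category_from_policy_hints(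
--     raw_rows: list[dict[str, Any]],
--     policy_map: dict[str, dict[str, Any]],
-- ) -> Optional[str]:
--     candidate_tokens = [
--         token
--         for row in raw_rows
--         for token in (
--             _clean_token(row.get(field))
--             for field in ("intent", "askAction", "path")
--         )
--         if token
--     ]
--     policy_keys = [key for key in policy_map if key and key != "default"]
--     if not policy_keys:
--         return None
--
--     pending: Optional[str] = None
--     for token in candidate_tokens:
--         if token in policy_map:
--             return token
--         if pending is None:
--             pending = next(
--                 (key for key in policy_keys if token in key or key in token),
--                 None,
--             )
--     return pending
--
-- def _clean_token(value: Any) -> str: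
--     text = str(value or "").strip().lower()
--     out: list[str] = []
--     pending_sep = True
--     for ch in text:
--         if ch in "-_ ":
--             pending_sep = True
--         else:
--             if pending_sep and out:
--                 out.append("_")
--             out.append(ch)
--             pending_sep = False
--     return "".join(out)
-- ===== Notes on version B (the rewrite author's own statement) =====
-- stated objective: alternative
-- what changed: B fuses A's two separate candidate-token passes (exact policy-map membership, then substring containment over policy keys) into one traversal carrying a pending-containment accumulator, and replaces A's chained replace / while-collapse / strip token normalizer with a single-pass separator state machine.
import Mathlib
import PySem

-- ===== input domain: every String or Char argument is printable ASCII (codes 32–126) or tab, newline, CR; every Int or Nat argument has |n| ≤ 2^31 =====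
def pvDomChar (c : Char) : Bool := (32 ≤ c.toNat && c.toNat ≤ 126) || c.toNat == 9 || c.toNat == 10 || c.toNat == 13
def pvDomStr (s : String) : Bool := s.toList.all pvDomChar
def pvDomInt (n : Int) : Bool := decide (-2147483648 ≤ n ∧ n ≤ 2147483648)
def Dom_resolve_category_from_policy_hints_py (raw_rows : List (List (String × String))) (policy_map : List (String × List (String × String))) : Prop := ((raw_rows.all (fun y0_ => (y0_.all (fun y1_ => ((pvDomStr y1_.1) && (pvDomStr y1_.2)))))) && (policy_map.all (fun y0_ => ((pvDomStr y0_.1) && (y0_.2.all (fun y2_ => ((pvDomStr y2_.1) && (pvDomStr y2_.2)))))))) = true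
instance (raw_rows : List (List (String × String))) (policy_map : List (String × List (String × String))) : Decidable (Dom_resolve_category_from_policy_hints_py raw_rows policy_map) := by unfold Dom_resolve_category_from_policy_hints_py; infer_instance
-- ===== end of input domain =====

-- B fuses A's two candidate-token passes (exact policy-key match, then substring containment)
-- into a single traversal with a pending-containment accumulator, and replaces A's
-- replace/while-collapse/strip token normalizer by a one-pass state machine (objective: alternative).

-- ===== PORT A =====
def pvRepU : List Char → List Char
  | '_' :: '_' :: t => '_' :: pvRepU t
  | c :: t => c :: pvRepU t
  | [] => []

theorem pvRepU_go (fuel : Nat) : ∀ (l acc : List Char), l.length ≤ fuel →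
    PySem.Chars.replace.go ['_', '_'] ['_'] fuel l acc = acc.reverse ++ pvRepU l := by
  induction fuel with
  | zero => intro l acc h; simp at h; subst h; simp [PySem.Chars.replace.go, pvRepU]
  | succ n ih =>
    intro l acc h
    match l with
    | [] => simp [PySem.Chars.replace.go, pvRepU]
    | [c] =>
      rw [PySem.Chars.replace.go]
      have hp : List.isPrefixOf ['_', '_'] [c] = false := by simp [List.isPrefixOf]
      rw [hp]
      simp only [Bool.false_eq_true, if_false]
      rw [ih [] (c :: acc) (by simp)]
      simp [pvRepU]
    | a :: b :: t =>
      rw [PySem.Chars.replace.go]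
      by_cases hab : a = '_' ∧ b = '_'
      · obtain ⟨rfl, rfl⟩ := hab
        have hp : List.isPrefixOf ['_', '_'] ('_' :: '_' :: t) = true := by
          simp [List.isPrefixOf]
        rw [hp]
        simp only [if_true, List.drop_succ_cons, List.drop_zero, List.reverse_cons,
          List.reverse_nil, List.nil_append, List.length]
        rw [show (['_'] ++ acc : List Char) = '_' :: acc from rfl, ih t ('_' :: acc) (by simp at h ⊢; omega)]
        simp [pvRepU]
      · have hp : List.isPrefixOf ['_', '_'] (a :: b :: t) = false := by
          simp [List.isPrefixOf]
          intro ha hb; exact hab ⟨ha.symm, hb.symm⟩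
        rw [hp]
        simp only [Bool.false_eq_true, if_false]
        rw [ih (b :: t) (a :: acc) (by simp at h ⊢; omega)]
        have : pvRepU (a :: b :: t) = a :: pvRepU (b :: t) := by
          rw [pvRepU.eq_def]
          split
          · rename_i t' heq
            injection heq with h1 h2; injection h2 with h2 h3
            exact absurd ⟨h1, h2⟩ hab
          · rename_i heq; injection heq with h1 h2; subst h1; subst h2; rfl
          · rename_i heq; cases heq
        rw [this]; simp

theorem pvReplace_eq_repU (s : List Char) :
    PySem.Chars.replace s ['_', '_'] ['_'] = pvRepU s := by
  rw [PySem.Chars.replace]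
  simp only [List.isEmpty_cons, Bool.false_eq_true, if_false]
  rw [pvRepU_go s.length s [] le_rfl]
  simp

theorem pvRepU_length_le (l : List Char) : (pvRepU l).length ≤ l.length := by
  induction l using pvRepU.induct with
  | case1 t ih => simp [pvRepU]; omega
  | case2 c t h ih =>
      rw [pvRepU.eq_def]
      split
      · rename_i t' heq
        exfalso; exact h t' (by injection heq) (by injection heq with h1 h2)
      · rename_i c' t' heq
        injection heq with h1 h2; subst h1; subst h2; simpa using ih
      · simp
  | case3 => simp [pvRepU]

theorem pvRepU_length_lt (l : List Char) (h : ['_', '_'] <:+: l) :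
    (pvRepU l).length < l.length := by
  induction l using pvRepU.induct with
  | case1 t ih =>
      have := pvRepU_length_le t
      simp [pvRepU]; omega
  | case2 c t hg ih =>
      rw [pvRepU.eq_def]
      split
      · rename_i t' heq
        exfalso; exact hg t' (by injection heq) (by injection heq with h1 h2)
      · rename_i c' t' heq
        injection heq with h1 h2; subst h1; subst h2
        rcases List.infix_cons_iff.mp h with hp | hi
        · rcases hp with ⟨r, hr⟩
          simp only [List.cons_append, List.nil_append, List.cons.injEq] at hr
          obtain ⟨h1, h2⟩ := hr
          exact (hg r h1.symm (by rw [← h2])).elim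
        · simpa using ih hi
      · rename_i heq; cases heq
  | case3 => simp at h

def pvCollapse (s : List Char) : List Char :=
  if PySem.Chars.isIn ['_', '_'] s = true then
    pvCollapse (PySem.Chars.replace s ['_', '_'] ['_'])
  else s
termination_by s.length
decreasing_by
  rw [pvReplace_eq_repU]
  exact pvRepU_length_lt s ((PySem.Chars.isIn_iff_infix _ _).mp (by assumption))

def normalize_token_py (value : Option String) : String :=
  let text := PySem.Str.lower (PySem.Str.strip (value.getD ""))
  if text = "" then ""
  else
    let normalized := PySem.Chars.replace (PySem.Chars.replace text.toList ['-'] ['_']) [' '] ['_']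
    String.mk (PySem.Chars.stripChars (pvCollapse normalized) ['_'])

def pvPass1 (pm : PySem.Dict String (List (String × String))) : List String → Option String
  | [] => none
  | t :: ts => if pm.contains t then some t else pvPass1 pm ts

def pvInnerScan (t : String) : List String → Option String
  | [] => none
  | k :: ks =>
      if t = k then some k
      else if PySem.Str.isIn t k || PySem.Str.isIn k t then some k
      else pvInnerScan t ks

def pvPass2 (keys : List String) : List String → Option String
  | [] => none
  | t :: ts =>
      match pvInnerScan t keys with
      | some k => some k
      | none => pvPass2 keys ts

def resolve_category_from_policy_hints_py (raw_rows : List (List (String × String))) (policy_map : List (String × List (String × String))) : Option String :=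
  let candidate_tokens := raw_rows.foldl (fun acc row =>
    [(PySem.Dict.ofList row).get? "intent",
     (PySem.Dict.ofList row).get? "askAction",
     (PySem.Dict.ofList row).get? "path"].foldl
      (fun acc v =>
        let token := normalize_token_py v
        if token ≠ "" then acc ++ [token] else acc) acc) []
  let pm := PySem.Dict.ofList policy_map
  let policy_keys := pm.keys.filter (fun k => !(k == "") && !(k == "default"))
  if policy_keys = [] then none
  else
    match pvPass1 pm candidate_tokens with
    | some t => some t
    | none => pvPass2 policy_keys candidate_tokens

-- ===== PORT B =====
def clean_token_py (value : Option String) : String :=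
  let text := PySem.Str.lower (PySem.Str.strip (value.getD ""))
  String.mk (text.toList.foldl (fun st c =>
      if c = '-' || c = '_' || c = ' ' then (st.1, true)
      else ((if st.2 && !st.1.isEmpty then st.1 ++ ['_'] else st.1) ++ [c], false))
    (([] : List Char), true)).1

def pvFindContain (t : String) (keys : List String) : Option String :=
  keys.find? (fun k => PySem.Str.isIn t k || PySem.Str.isIn k t)

def pvLoopB (pm : PySem.Dict String (List (String × String))) (keys : List String) : List String → Option String → Option String
  | [], pending => pending
  | t :: ts, pending =>
      if pm.contains t then some t
      else pvLoopB pm keys ts (if pending.isNone then pvFindContain t keys else pending)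

def resolve_category_from_policy_hints_py_alt (raw_rows : List (List (String × String))) (policy_map : List (String × List (String × String))) : Option String :=
  let pm := PySem.Dict.ofList policy_map
  let candidate_tokens := raw_rows.flatMap (fun row =>
    (["intent", "askAction", "path"].map (fun f => clean_token_py ((PySem.Dict.ofList row).get? f))).filter
      (fun t => decide (t ≠ "")))
  let policy_keys := pm.keys.filter (fun k => !(k == "") && !(k == "default"))
  if policy_keys = [] then none
  else pvLoopB pm policy_keys candidate_tokens none

-- ===== PRECONDITION & SPEC =====
def Spec_resolve_category_from_policy_hints_py (raw_rows : List (List (String × String))) (policy_map : List (String × List (String × String))) (out : Option String) : Prop := out = resolve_category_from_policy_hints_py_alt raw_rows policy_map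
instance (raw_rows : List (List (String × String))) (policy_map : List (String × List (String × String))) (out : Option String) : Decidable (Spec_resolve_category_from_policy_hints_py raw_rows policy_map out) := by unfold Spec_resolve_category_from_policy_hints_py; infer_instance

-- ===== CLAIM (what is proved, stated in full; the proofs are below) =====
def Claim_equal_resolve_category_from_policy_hints_py : Prop := ∀ (raw_rows : List (List (String × String))) (policy_map : List (String × List (String × String))), Dom_resolve_category_from_policy_hints_py raw_rows policy_map → Spec_resolve_category_from_policy_hints_py raw_rows policy_map (resolve_category_from_policy_hints_py raw_rows policy_map)

-- ===== LEMMAS AND PROOFS =====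
theorem pvRepU_head (l : List Char) : (pvRepU l).head? = l.head? := by
  induction l using pvRepU.induct with
  | case1 t ih => simp [pvRepU]
  | case2 c t hg ih =>
      rw [pvRepU.eq_def]
      split
      · rename_i t' heq; exfalso; exact hg t' (by injection heq) (by injection heq with h1 h2)
      · rename_i c' t' heq; injection heq with h1 h2; subst h1; subst h2; simp
      · rename_i heq; cases heq
  | case3 => simp [pvRepU]

def pvSq : List Char → List Char
  | '_' :: '_' :: t => pvSq ('_' :: t)
  | c :: t => c :: pvSq t
  | [] => []
termination_by l => l.length

theorem pvSq_cons_cons (t : List Char) : pvSq ('_' :: '_' :: t) = pvSq ('_' :: t) := by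
  rw [pvSq]

theorem pvSq_cons_ne (c : Char) (t : List Char) (h : ¬ (c = '_' ∧ t.head? = some '_')) :
    pvSq (c :: t) = c :: pvSq t := by
  rw [pvSq.eq_def]
  split
  · rename_i t' heq
    injection heq with h1 h2; subst h1; subst h2
    exact absurd ⟨rfl, rfl⟩ h
  · rename_i c' t' heq; injection heq with h1 h2; subst h1; subst h2; rfl
  · rename_i heq; cases heq

theorem pvSq_cons_u (x : List Char) :
    pvSq ('_' :: x) = if x.head? = some '_' then pvSq x else '_' :: pvSq x := by
  rcases x with _ | ⟨b, t⟩
  · simp [pvSq]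
  · by_cases hb : b = '_'
    · subst hb; rw [pvSq_cons_cons]; simp
    · rw [pvSq_cons_ne '_' (b :: t) (by simp [hb])]
      simp [hb]

theorem pvNoDouble (l : List Char) (h : ¬ ['_', '_'] <:+: l) : pvSq l = l := by
  induction l using pvSq.induct with
  | case1 t ih => exact absurd (by exact ⟨[], t, rfl⟩) h
  | case2 c t hg ih =>
      rw [pvSq_cons_ne c t (by intro ⟨h1, h2⟩; rcases t with _ | ⟨b, t'⟩ <;> simp at h2 <;> exact hg t' h1 (by rw [h2]))]
      rw [ih (fun hi => h (hi.trans (List.suffix_cons c t).isInfix))]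
  | case3 => rw [pvSq]

theorem pvSq_repU (l : List Char) : pvSq (pvRepU l) = pvSq l := by
  induction l using pvRepU.induct with
  | case1 t ih =>
      rw [show pvRepU ('_' :: '_' :: t) = '_' :: pvRepU t from by rw [pvRepU]]
      rw [pvSq_cons_cons, pvSq_cons_u, pvSq_cons_u, pvRepU_head, ih]
  | case2 c t hg ih =>
      have hr : pvRepU (c :: t) = c :: pvRepU t := by
        rw [pvRepU.eq_def]
        split
        · rename_i t' heq
          injection heq with h1 h2
          exact (hg t' h1 h2).elim
        · rename_i c' t' heq; injection heq with h1 h2; subst h1; subst h2; rfl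
        · rename_i heq; cases heq
      rw [hr]
      by_cases hc : c = '_'
      · subst hc
        rw [pvSq_cons_u, pvSq_cons_u, pvRepU_head, ih]
      · rw [pvSq_cons_ne c _ (by simp [hc]), pvSq_cons_ne c _ (by simp [hc]), ih]
  | case3 => rfl

theorem pvCollapse_eq_sq (l : List Char) : pvCollapse l = pvSq l := by
  induction l using pvCollapse.induct with
  | case1 l hin ih =>
      rw [pvCollapse, if_pos hin, ih, pvReplace_eq_repU, pvSq_repU]
  | case2 l hin =>
      rw [pvCollapse, if_neg hin]
      exact (pvNoDouble l (fun hi => hin ((PySem.Chars.isIn_iff_infix _ _).mpr hi))).symm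

theorem pvGo_single (a b : Char) (fuel : Nat) : ∀ (l acc : List Char), l.length ≤ fuel →
    PySem.Chars.replace.go [a] [b] fuel l acc
      = acc.reverse ++ l.map (fun c => if c = a then b else c) := by
  induction fuel with
  | zero => intro l acc h; simp at h; subst h; simp [PySem.Chars.replace.go]
  | succ n ih =>
    intro l acc h
    match l with
    | [] => simp [PySem.Chars.replace.go]
    | c :: t =>
      rw [PySem.Chars.replace.go]
      by_cases hc : c = a
      · subst hc
        have hp : List.isPrefixOf [c] (c :: t) = true := by simp [List.isPrefixOf]
        rw [hp]
        simp only [if_true, List.length_cons, List.length_nil, List.drop_succ_cons,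
          List.drop_zero, List.reverse_cons, List.reverse_nil, List.nil_append]
        rw [show ([b] ++ acc : List Char) = b :: acc from rfl, ih t (b :: acc) (by simp at h ⊢; omega)]
        simp
      · have hp : List.isPrefixOf [a] (c :: t) = false := by
          simp [List.isPrefixOf]; exact fun he => absurd he.symm hc
        rw [hp]
        simp only [Bool.false_eq_true, if_false]
        rw [ih t (c :: acc) (by simp at h ⊢; omega)]
        simp [hc]

theorem pvReplace_single (s : List Char) (a b : Char) :
    PySem.Chars.replace s [a] [b] = s.map (fun c => if c = a then b else c) := by
  rw [PySem.Chars.replace]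
  simp only [List.isEmpty_cons, Bool.false_eq_true, if_false]
  rw [pvGo_single a b s.length s [] le_rfl]
  simp

def pvSep (c : Char) : Bool := c = '-' || c = '_' || c = ' '

def pvM (c : Char) : Char := if c = '-' then '_' else if c = ' ' then '_' else c

def pvRstrip (x : List Char) : List Char := (x.reverse.dropWhile (fun c => c == '_')).reverse

theorem pvStripChars_u (s : List Char) :
    PySem.Chars.stripChars s ['_'] = pvRstrip (s.dropWhile (fun c => c == '_')) := by
  rw [PySem.Chars.stripChars, pvRstrip]
  have hp : (fun c => List.contains ['_'] c) = (fun c : Char => c == '_') := by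
    funext c; simp
    by_cases h : c = '_' <;> simp [h]
  rw [hp]

theorem pvRstrip_cons (a : Char) (y : List Char) :
    pvRstrip (a :: y) = if pvRstrip y = [] then (if a = '_' then [] else [a]) else a :: pvRstrip y := by
  rw [pvRstrip, pvRstrip]
  rw [List.reverse_cons, List.dropWhile_append]
  by_cases he : (y.reverse.dropWhile (fun c => c == '_')) = []
  · rw [he]
    by_cases ha : a = '_'
    · simp [ha, List.dropWhile]
    · simp [ha, List.dropWhile]
      rw [show (a == '_') = false from by simp [ha]]
  · have h1 : (y.reverse.dropWhile (fun c => c == '_')).isEmpty = false := by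
      simpa [List.isEmpty_iff] using he
    rw [h1]
    simp only [Bool.false_eq_true, if_false, List.reverse_append]
    have h2 : ¬ ((y.reverse.dropWhile (fun c => c == '_')).reverse = []) := by simpa using he
    rw [if_neg h2]
    simp

theorem pvRstrip_cons_ne (c : Char) (x : List Char) (hc : ¬ c = '_') :
    pvRstrip (c :: x) = c :: pvRstrip x := by
  rw [pvRstrip_cons]
  split
  rename_i h; rw [h]
  simp [hc]

def pvEmit : List Char → Bool → Bool → List Char
  | [], _, _ => []
  | c :: t, prev, started =>
    if pvSep c then pvEmit t true started
    else (if prev && started then ['_'] else []) ++ c :: pvEmit t false true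

def pvEmitU : List Char → Bool → Bool → List Char
  | [], _, _ => []
  | c :: t, prev, started =>
    if c = '_' then pvEmitU t true started
    else (if prev && started then ['_'] else []) ++ c :: pvEmitU t false true

theorem pvEmit_eq_emitU (u : List Char) : ∀ p s, pvEmit u p s = pvEmitU (u.map pvM) p s := by
  induction u with
  | nil => intro p s; rfl
  | cons c t ih =>
      intro p s
      by_cases hc : pvSep c = true
      · have hm : pvM c = '_' := by
          rcases (by simpa [pvSep, or_assoc] using hc : c = '-' ∨ c = '_' ∨ c = ' ') with h | h | h <;>
            simp [pvM, h]
        simp only [pvEmit, pvEmitU, List.map_cons, hc, hm, if_true]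
        exact ih true s
      · have hc' : ¬ c = '-' ∧ ¬ c = '_' ∧ ¬ c = ' ' := by
          simpa [pvSep, or_assoc, not_or] using hc
        have hm : pvM c = c := by simp [pvM, hc'.1, hc'.2.2]
        simp only [pvEmit, pvEmitU, List.map_cons, hc, hm, Bool.false_eq_true, if_false,
          if_neg hc'.2.1]
        rw [ih false true]

theorem pvHG (v : List Char) :
    pvEmitU v false true = pvRstrip (pvSq v) ∧ pvEmitU v true true = pvRstrip (pvSq ('_' :: v)) := by
  induction v with
  | nil =>
      constructor
      · rw [pvSq]; rfl
      · rw [pvSq_cons_ne '_' [] (by simp), pvSq]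
        simp [pvEmitU, pvRstrip, List.dropWhile]
  | cons c v ih =>
      by_cases hc : c = '_'
      · subst hc
        constructor
        · rw [show pvEmitU ('_' :: v) false true = pvEmitU v true true from by simp [pvEmitU]]
          exact ih.2
        · rw [show pvEmitU ('_' :: v) true true = pvEmitU v true true from by simp [pvEmitU]]
          rw [pvSq_cons_cons]
          exact ih.2
      · constructor
        · rw [show pvEmitU (c :: v) false true = c :: pvEmitU v false true from by
            simp [pvEmitU, hc]]
          rw [pvSq_cons_ne c v (by simp [hc]), pvRstrip_cons_ne c _ hc, ih.1]
        · rw [show pvEmitU (c :: v) true true = '_' :: c :: pvEmitU v false true from by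
            simp [pvEmitU, hc]]
          rw [pvSq_cons_ne '_' (c :: v) (by simp [hc]), pvSq_cons_ne c v (by simp [hc])]
          rw [pvRstrip_cons '_', pvRstrip_cons_ne c _ hc]
          rw [if_neg (by simp), ih.1]

theorem pvT (u : List Char) : ∀ p, pvEmitU u p false = PySem.Chars.stripChars (pvSq u) ['_'] := by
  induction u with
  | nil => intro p; rw [pvSq]; rfl
  | cons c u ih =>
      intro p
      by_cases hc : c = '_'
      · subst hc
        rw [show pvEmitU ('_' :: u) p false = pvEmitU u true false from by simp [pvEmitU]]
        rw [ih true, pvSq_cons_u]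
        split
        · rfl
        · rw [pvStripChars_u, pvStripChars_u]
          rw [show List.dropWhile (fun c => c == '_') ('_' :: pvSq u)
                = List.dropWhile (fun c => c == '_') (pvSq u) from by simp [List.dropWhile]]
      · rw [show pvEmitU (c :: u) p false = c :: pvEmitU u false true from by
            simp [pvEmitU, hc]]
        rw [(pvHG u).1, pvSq_cons_ne c u (by simp [hc]), pvStripChars_u]
        rw [show List.dropWhile (fun c => c == '_') (c :: pvSq u) = c :: pvSq u from by
            simp [List.dropWhile]
            rw [show (c == '_') = false from by simp [hc]]]
        rw [pvRstrip_cons_ne c _ hc]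

theorem pvFoldl_emit (t : List Char) : ∀ (acc : List Char) (prev : Bool),
    (t.foldl (fun st c =>
      if c = '-' || c = '_' || c = ' ' then (st.1, true)
      else ((if st.2 && !st.1.isEmpty then st.1 ++ ['_'] else st.1) ++ [c], false))
      (acc, prev)).1 = acc ++ pvEmit t prev (!acc.isEmpty) := by
  induction t with
  | nil => intro acc prev; simp [pvEmit]
  | cons c t ih =>
      intro acc prev
      by_cases hc : (c = '-' || c = '_' || c = ' ') = true
      · rw [List.foldl_cons, if_pos hc, ih acc true]
        rw [show pvEmit (c :: t) prev (!acc.isEmpty) = pvEmit t true (!acc.isEmpty) from by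
          simp only [pvEmit, pvSep]; rw [if_pos (by simpa [or_assoc] using hc)]]
      · rw [List.foldl_cons, if_neg hc]
        rw [ih _ false]
        rw [show pvEmit (c :: t) prev (!acc.isEmpty) =
              (if prev && !acc.isEmpty then ['_'] else []) ++ c :: pvEmit t false true from by
          simp only [pvEmit, pvSep]; rw [if_neg (by simpa [or_assoc] using hc)]]
        have hne : ((if (prev && !acc.isEmpty) = true then acc ++ ['_'] else acc) ++ [c]).isEmpty = false := by
          split <;> simp
        rw [hne]
        split
        · simp [pvEmit]
        · simp [pvEmit]

theorem pvNormalize_eq (v : Option String) : normalize_token_py v = clean_token_py v := by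
  rw [normalize_token_py, clean_token_py]
  by_cases he : PySem.Str.lower (PySem.Str.strip (v.getD "")) = ""
  · rw [if_pos he, he]
    rfl
  · rw [if_neg he]
    rw [pvReplace_single, pvReplace_single, List.map_map]
    have hm : ((fun c => if c = ' ' then '_' else c) ∘ fun c : Char => if c = '-' then '_' else c)
        = pvM := by
      funext c
      by_cases h1 : c = '-' <;> by_cases h2 : c = ' ' <;> simp [pvM, Function.comp, h1, h2]
    rw [hm]
    show String.mk (PySem.Chars.stripChars
      (pvCollapse (List.map pvM (PySem.Str.lower (PySem.Str.strip (v.getD ""))).toList)) ['_']) = _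
    rw [pvCollapse_eq_sq, ← pvT _ true, ← pvEmit_eq_emitU]
    rw [pvFoldl_emit ((PySem.Str.lower (PySem.Str.strip (v.getD ""))).toList) [] true]
    simp

theorem pvRow_eq (row : List (String × String)) (acc : List String) :
    [(PySem.Dict.ofList row).get? "intent",
     (PySem.Dict.ofList row).get? "askAction",
     (PySem.Dict.ofList row).get? "path"].foldl
      (fun acc v =>
        let token := normalize_token_py v
        if token ≠ "" then acc ++ [token] else acc) acc
    = acc ++ (["intent", "askAction", "path"].map
        (fun f => clean_token_py ((PySem.Dict.ofList row).get? f))).filter (fun t => decide (t ≠ "")) := by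
  simp only [List.foldl, List.map, List.filter]
  rw [pvNormalize_eq, pvNormalize_eq, pvNormalize_eq]
  by_cases h1 : clean_token_py ((PySem.Dict.ofList row).get? "intent") = "" <;>
    by_cases h2 : clean_token_py ((PySem.Dict.ofList row).get? "askAction") = "" <;>
      by_cases h3 : clean_token_py ((PySem.Dict.ofList row).get? "path") = "" <;>
        simp [h1, h2, h3, List.filter]

theorem pvTokens_eq (rows : List (List (String × String))) : ∀ (acc : List String),
    rows.foldl (fun acc row =>
      [(PySem.Dict.ofList row).get? "intent",
       (PySem.Dict.ofList row).get? "askAction",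
       (PySem.Dict.ofList row).get? "path"].foldl
        (fun acc v =>
          let token := normalize_token_py v
          if token ≠ "" then acc ++ [token] else acc) acc) acc
    = acc ++ rows.flatMap (fun row =>
        (["intent", "askAction", "path"].map
          (fun f => clean_token_py ((PySem.Dict.ofList row).get? f))).filter (fun t => decide (t ≠ ""))) := by
  induction rows with
  | nil => intro acc; simp
  | cons row rows ih =>
      intro acc
      rw [List.foldl_cons, pvRow_eq, ih, List.flatMap_cons]
      exact List.append_assoc _ _ _

theorem pvIsIn_self (t : String) : PySem.Str.isIn t t = true := by
  rw [PySem.Str.isIn_iff_infix]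

theorem pvInner_eq_find (t : String) : ∀ ks, pvInnerScan t ks = pvFindContain t ks := by
  intro ks
  induction ks with
  | nil => rfl
  | cons k ks ih =>
      rw [pvInnerScan, pvFindContain, List.find?]
      by_cases he : t = k
      · subst he
        rw [if_pos rfl]
        rw [show (PySem.Str.isIn t t || PySem.Str.isIn t t) = true from by rw [pvIsIn_self]; rfl]
      · rw [if_neg he]
        by_cases hp : (PySem.Str.isIn t k || PySem.Str.isIn k t) = true
        · rw [if_pos hp, hp]
        · rw [if_neg hp, show (PySem.Str.isIn t k || PySem.Str.isIn k t) = false from by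
            simpa using hp]
          exact ih

theorem pvLoopB_eq (pm : PySem.Dict String (List (String × String))) (keys : List String) :
    ∀ (ts : List String) (pending : Option String),
      pvLoopB pm keys ts pending
        = (pvPass1 pm ts).or (pending.or (pvPass2 keys ts)) := by
  intro ts
  induction ts with
  | nil => intro pending; cases pending <;> rfl
  | cons t ts ih =>
      intro pending
      rw [pvLoopB, pvPass1, pvPass2]
      by_cases hc : pm.contains t = true
      · rw [if_pos hc, if_pos hc]
        rfl
      · rw [if_neg hc, if_neg hc, ih]
        rw [pvInner_eq_find]
        cases hp : pending with
        | some p => simp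
        | none =>
            simp only [Option.isNone_none, if_pos rfl]
            cases hf : pvFindContain t keys with
            | some k => simp
            | none => simp

theorem pvMain (raw_rows : List (List (String × String))) (policy_map : List (String × List (String × String))) :
    resolve_category_from_policy_hints_py raw_rows policy_map
      = resolve_category_from_policy_hints_py_alt raw_rows policy_map := by
  rw [resolve_category_from_policy_hints_py, resolve_category_from_policy_hints_py_alt]
  simp only []
  rw [pvTokens_eq raw_rows []]
  rw [List.nil_append]
  by_cases hk : (PySem.Dict.ofList policy_map).keys.filter (fun k => !(k == "") && !(k == "default")) = []
  · rw [if_pos hk, if_pos hk]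
  · rw [if_neg hk, if_neg hk]
    rw [pvLoopB_eq]
    cases pvPass1 (PySem.Dict.ofList policy_map)
        (raw_rows.flatMap (fun row =>
          (["intent", "askAction", "path"].map
            (fun f => clean_token_py ((PySem.Dict.ofList row).get? f))).filter
              (fun t => decide (t ≠ "")))) with
    | some t => simp
    | none => simp

-- ===== VERDICT (by name: the statement is the Claim_ definition above) =====
theorem resolve_category_from_policy_hints_py_spec : Claim_equal_resolve_category_from_policy_hints_py := by
  intro raw_rows policy_map _
  unfold Spec_resolve_category_from_policy_hints_py
  exact pvMain raw_rows policy_map
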